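-- pv_equiv track=rewrite | github.com/rishabhjain02/Data-Structures-And-Algorithms | String Algorithm/Boring substring.py | solve
-- ===== SOURCE A (Python) =====
-- def solve(A):
--     n = len(A)
--     odd = []
--     even = []
--     freq = [0]*26
--     even_min = 0
--     even_max = 0
--     odd_min = 0
--     odd_max = 0
--
--     for char in A:
--         freq[ord(char) - ord('a')] += 1
--
--     for i in range(26):
--         if i%2 == 0 and freq[i] > 0:
--             even_min = i
--             break
--
--     for i in range(26):
--         if i%2 != 0 and freq[i] > 0:
--             odd_min = i
--             break
--
--     for i in range(25, -1, -1):
--         if i%2 == 0 and freq[i] > 0: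
--             even_max = i
--             break
--
--     for i in range(25, -1, -1):
--         if i%2 != 0 and freq[i] > 0:
--             odd_max = i
--             break
--
--     if abs(even_min - odd_max) == 1 and abs(even_max - odd_min) == 1:
--         return 0
--     return 1
-- ===== SOURCE B (Python) =====
-- def solve(A):
--     even_min = even_max = odd_min = odd_max = 0
--     seen_even = seen_odd = False
--     for ch in A:
--         j = (ord(ch) - ord('a')) % 26
--         if j % 2 == 0:
--             if seen_even:
--                 if j < even_min: even_min = j
--                 if j > even_max: even_max = j
--             else:
--                 even_min = even_max = j
--                 seen_even = True
--         else:
--             if seen_odd: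
--                 if j < odd_min: odd_min = j
--                 if j > odd_max: odd_max = j
--             else:
--                 odd_min = odd_max = j
--                 seen_odd = True
--     if abs(even_min - odd_max) == 1 and abs(even_max - odd_min) == 1:
--         return 0
--     return 1
-- ===== Notes on version B (the rewrite author's own statement) =====
-- stated objective: simpler
-- what changed: B drops the 26-slot frequency table and the four directional break-scans, instead keeping running per-parity minima/maxima (with seen flags) in a single pass over the string before the same final parity-gap test.
import Mathlib
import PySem

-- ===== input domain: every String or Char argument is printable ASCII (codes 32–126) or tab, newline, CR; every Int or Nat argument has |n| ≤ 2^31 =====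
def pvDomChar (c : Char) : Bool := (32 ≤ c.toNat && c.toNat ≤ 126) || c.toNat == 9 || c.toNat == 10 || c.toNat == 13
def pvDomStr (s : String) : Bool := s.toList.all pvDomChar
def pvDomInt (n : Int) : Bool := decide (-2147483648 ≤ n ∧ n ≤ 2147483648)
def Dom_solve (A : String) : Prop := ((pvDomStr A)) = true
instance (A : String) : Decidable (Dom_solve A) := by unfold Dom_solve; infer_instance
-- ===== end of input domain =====

-- B replaces the 26-slot frequency table and the four directional scans by one pass that keeps
-- running per-parity extremes (objective: simpler; same O(n) cost).

-- ===== PORT A =====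
-- freq[i] += 1 with Python list-index semantics: negative i wraps, out-of-range raises
-- (the raising inputs are excluded by Pre_solve; there this helper leaves the list unchanged).
def pyIncrAt (f : List Int) (i : Int) : List Int :=
  match PySem.List.pyGet? f i with
  | some v => PySem.List.pySetD f i (v + 1)
  | none => f

def solve (A : String) : Int :=
  let _n := PySem.Str.len A
  let _odd : List Int := []
  let _even : List Int := []
  let freq := A.toList.foldl (fun f ch => pyIncrAt f ((ch.toNat : Int) - 97)) (List.replicate 26 (0 : Int))
  -- each 'for i in range(…): if …: x = i; break' loop, with x defaulting to 0, is find?/getD 0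
  let even_min := ((PySem.List.pyRange 0 26 1).find? (fun i => PySem.Int.mod i 2 == 0 && decide (0 < PySem.List.pyGetD freq i 0))).getD 0
  let odd_min := ((PySem.List.pyRange 0 26 1).find? (fun i => PySem.Int.mod i 2 != 0 && decide (0 < PySem.List.pyGetD freq i 0))).getD 0
  let even_max := ((PySem.List.pyRange 25 (-1) (-1)).find? (fun i => PySem.Int.mod i 2 == 0 && decide (0 < PySem.List.pyGetD freq i 0))).getD 0
  let odd_max := ((PySem.List.pyRange 25 (-1) (-1)).find? (fun i => PySem.Int.mod i 2 != 0 && decide (0 < PySem.List.pyGetD freq i 0))).getD 0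
  if (even_min - odd_max).natAbs == 1 && (even_max - odd_min).natAbs == 1 then 0 else 1

-- ===== PORT B =====
-- state: (even_min, even_max, odd_min, odd_max, seen_even, seen_odd)
def stepB (s : Int × Int × Int × Int × Bool × Bool) (ch : Char) : Int × Int × Int × Int × Bool × Bool :=
  let j := PySem.Int.mod ((ch.toNat : Int) - 97) 26
  match s with
  | (emin, emax, omin, omax, se, so) =>
    if PySem.Int.mod j 2 == 0 then
      if se then
        (if j < emin then j else emin, if emax < j then j else emax, omin, omax, se, so)
      else
        (j, j, omin, omax, true, so)
    else
      if so then
        (emin, emax, if j < omin then j else omin, if omax < j then j else omax, se, so)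
      else
        (emin, emax, j, j, se, true)

def solve_alt (A : String) : Int :=
  match A.toList.foldl stepB (0, 0, 0, 0, false, false) with
  | (emin, emax, omin, omax, _, _) =>
    if (emin - omax).natAbs == 1 && (emax - omin).natAbs == 1 then 0 else 1

-- ===== PRECONDITION & SPEC =====
-- Pre_solve excludes exactly the inputs on which A raises IndexError: a character whose code is
-- below 71 or above 122 makes the raw index code-97 fall outside the freq list's range [-26, 25].
def Pre_solve (A : String) : Prop := (A.toList.all (fun c => 71 ≤ c.toNat && c.toNat ≤ 122)) = true
instance (A : String) : Decidable (Pre_solve A) := by unfold Pre_solve; infer_instance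
def pvWitness_solve : String := "ab"

def Spec_solve (A : String) (out : Int) : Prop := out = solve_alt A
instance (A : String) (out : Int) : Decidable (Spec_solve A out) := by unfold Spec_solve; infer_instance

-- ===== CLAIM (what is proved, stated in full; the proofs are below) =====
def Claim_equal_solve : Prop := ∀ (A : String), Dom_solve A → Pre_solve A → Spec_solve A (solve A)

-- ===== LEMMAS AND PROOFS =====

-- the index Python effectively touches: (ord c - 97) mod 26, as a Nat
def idxN (c : Char) : Nat := (c.toNat + 7) % 26

def js (l : List Char) : List Nat := l.map idxN
def evens (l : List Char) : List Nat := (js l).filter (fun j => j % 2 == 0)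
def odds (l : List Char) : List Nat := (js l).filter (fun j => !(j % 2 == 0))

theorem idxN_lt (c : Char) : idxN c < 26 := Nat.mod_lt _ (by norm_num)

theorem idx_int (c : Char) :
    PySem.Int.mod ((c.toNat : Int) - 97) 26 = ((idxN c : Nat) : Int) := by
  rw [PySem.Int.mod_eq_emod_of_pos (by norm_num)]
  unfold idxN
  omega

theorem jmod2 (n : Nat) : PySem.Int.mod ((n : Nat) : Int) 2 = ((n % 2 : Nat) : Int) := by
  rw [PySem.Int.mod_eq_emod_of_pos (by norm_num)]; omega

theorem pyIncrAt_eq (f : List Int) (hf : f.length = 26) (c : Char)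
    (h1 : 71 ≤ c.toNat) (h2 : c.toNat ≤ 122) :
    pyIncrAt f ((c.toNat : Int) - 97) = f.set (idxN c) (f.getD (idxN c) 0 + 1) := by
  have hidx : PySem.List.pyIdx? f.length ((c.toNat : Int) - 97) = some (idxN c) := by
    unfold PySem.List.pyIdx? idxN
    rw [hf]
    split_ifs <;> first | (exfalso; omega) | (simp only [Option.some.injEq]; omega)
  have hlt : idxN c < f.length := hf ▸ idxN_lt c
  unfold pyIncrAt
  simp [PySem.List.pyGet?, PySem.List.pySetD, PySem.List.pySet?, hidx,
        List.getElem?_eq_getElem hlt]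

theorem freq_spec (l : List Char) (f : List Int) (hf : f.length = 26)
    (hl : ∀ c ∈ l, 71 ≤ c.toNat ∧ c.toNat ≤ 122) :
    (l.foldl (fun f ch => pyIncrAt f ((ch.toNat : Int) - 97)) f).length = 26 ∧
    ∀ k : Nat, k < 26 →
      (l.foldl (fun f ch => pyIncrAt f ((ch.toNat : Int) - 97)) f).getD k 0
        = f.getD k 0 + ((js l).count k : Int) := by
  induction l generalizing f with
  | nil => simp [js, hf]
  | cons c t ih =>
    obtain ⟨hc1, hc2⟩ := hl c (List.mem_cons_self ..)
    rw [List.foldl_cons]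
    simp only [pyIncrAt_eq f hf c hc1 hc2]
    have hf' : (f.set (idxN c) (f.getD (idxN c) 0 + 1)).length = 26 := by simp [hf]
    obtain ⟨hlen, hcount⟩ := ih _ hf' (fun c hc => hl c (List.mem_cons_of_mem _ hc))
    refine ⟨hlen, fun k hk => ?_⟩
    rw [hcount k hk]
    have hget : (f.set (idxN c) (f.getD (idxN c) 0 + 1)).getD k 0
        = if idxN c = k then f.getD k 0 + 1 else f.getD k 0 := by
      have hlt : idxN c < f.length := hf ▸ idxN_lt c
      simp only [List.getD_eq_getElem?_getD, List.getElem?_set, if_pos hlt]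
      split_ifs with h
      · subst h; simp [List.getElem?_eq_getElem hlt]
      · rfl
    rw [hget]
    simp only [js, List.map_cons, List.count_cons, beq_iff_eq]
    split_ifs <;> push_cast <;> omega

theorem find?_asc (q : Int → Bool) (E : List Nat)
    (hq : ∀ k : Nat, k < 26 → (q (k : Int) = true ↔ k ∈ E)) (hE : ∀ j ∈ E, j < 26) :
    ((PySem.List.pyRange 0 26 1).find? q).getD 0 = ((E.min?.getD 0 : Nat) : Int) := by
  cases e : E.min? with
  | none =>
    have hEe : E = [] := List.min?_eq_none_iff.mp e
    have hn : (PySem.List.pyRange 0 26 1).find? q = none := by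
      rw [List.find?_eq_none]
      intro x hx
      rw [PySem.List.mem_pyRange_one] at hx
      have hx' : x = ((x.toNat : Nat) : Int) := by omega
      rw [hx']
      intro hqx
      have := (hq x.toNat (by omega)).mp hqx
      simp [hEe] at this
    simp [hn]
  | some m =>
    obtain ⟨hmem, hle⟩ := List.min?_eq_some_iff.mp e
    have hm26 : m < 26 := hE m hmem
    rw [PySem.List.pyRange_one_append 0 m 26 (by omega) (by exact_mod_cast hm26.le)]
    rw [List.find?_append]
    have h1 : (PySem.List.pyRange 0 m 1).find? q = none := by
      rw [List.find?_eq_none]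
      intro x hx
      rw [PySem.List.mem_pyRange_one] at hx
      have hx' : x = ((x.toNat : Nat) : Int) := by omega
      rw [hx']
      intro hqx
      have hmm := (hq x.toNat (by omega)).mp hqx
      have := hle x.toNat hmm
      omega
    have h2 : (PySem.List.pyRange m 26 1).find? q = some (m : Int) := by
      rw [PySem.List.pyRange_one_cons (by exact_mod_cast hm26)]
      simp [(hq m hm26).mpr hmem]
    simp [h1, h2]

theorem find?_desc (q : Int → Bool) (E : List Nat)
    (hq : ∀ k : Nat, k < 26 → (q (k : Int) = true ↔ k ∈ E)) (hE : ∀ j ∈ E, j < 26) :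
    ((PySem.List.pyRange 25 (-1) (-1)).find? q).getD 0 = ((E.max?.getD 0 : Nat) : Int) := by
  have hrev : PySem.List.pyRange 25 (-1) (-1) = (PySem.List.pyRange 0 26 1).reverse := by
    rw [PySem.List.pyRange_neg_one_eq_reverse]; norm_num
  rw [hrev]
  cases e : E.max? with
  | none =>
    have hEe : E = [] := List.max?_eq_none_iff.mp e
    have hn : ((PySem.List.pyRange 0 26 1).reverse).find? q = none := by
      rw [List.find?_eq_none]
      intro x hx
      rw [List.mem_reverse, PySem.List.mem_pyRange_one] at hx
      have hx' : x = ((x.toNat : Nat) : Int) := by omega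
      rw [hx']
      intro hqx
      have := (hq x.toNat (by omega)).mp hqx
      simp [hEe] at this
    simp [hn]
  | some m =>
    obtain ⟨hmem, hge⟩ := List.max?_eq_some_iff.mp e
    have hm26 : m < 26 := hE m hmem
    rw [PySem.List.pyRange_one_append 0 ((m : Int) + 1) 26 (by omega) (by exact_mod_cast hm26), List.reverse_append, List.find?_append]
    have h1 : ((PySem.List.pyRange ((m : Int) + 1) 26 1).reverse).find? q = none := by
      rw [List.find?_eq_none]
      intro x hx
      rw [List.mem_reverse, PySem.List.mem_pyRange_one] at hx
      have hx' : x = ((x.toNat : Nat) : Int) := by omega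
      rw [hx']
      intro hqx
      have hmm := (hq x.toNat (by omega)).mp hqx
      have := hge x.toNat hmm
      omega
    rw [PySem.List.pyRange_one_succ_right (show (0:Int) ≤ (m:Int) by omega)]
    simp [h1, (hq m hm26).mpr hmem]

theorem min?_concat (E : List Nat) (j : Nat) :
    (E ++ [j]).min? = some (match E.min? with | none => j | some m => min m j) := by
  cases e : E.min? with
  | none => simp [List.min?_eq_none_iff.mp e]
  | some m =>
    obtain ⟨hm, hle⟩ := List.min?_eq_some_iff.mp e
    apply List.min?_eq_some_iff.mpr
    show min m j ∈ E ++ [j] ∧ ∀ b ∈ E ++ [j], min m j ≤ b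
    refine ⟨?_, ?_⟩
    · have h : min m j = m ∨ min m j = j := by omega
      rcases h with h | h <;> rw [h]
      · exact List.mem_append_left _ hm
      · exact List.mem_append_right _ (by simp)
    · intro b hb
      rcases List.mem_append.mp hb with h | h
      · have := hle b h; omega
      · simp at h; omega

theorem max?_concat (E : List Nat) (j : Nat) :
    (E ++ [j]).max? = some (match E.max? with | none => j | some m => max m j) := by
  cases e : E.max? with
  | none => simp [List.max?_eq_none_iff.mp e]
  | some m =>
    obtain ⟨hm, hge⟩ := List.max?_eq_some_iff.mp e
    apply List.max?_eq_some_iff.mpr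
    show max m j ∈ E ++ [j] ∧ ∀ b ∈ E ++ [j], b ≤ max m j
    refine ⟨?_, ?_⟩
    · have h : max m j = m ∨ max m j = j := by omega
      rcases h with h | h <;> rw [h]
      · exact List.mem_append_left _ hm
      · exact List.mem_append_right _ (by simp)
    · intro b hb
      rcases List.mem_append.mp hb with h | h
      · have := hge b h; omega
      · simp at h; omega

theorem evens_concat (l : List Char) (c : Char) :
    evens (l ++ [c]) = evens l ++ (if idxN c % 2 == 0 then [idxN c] else []) := by
  simp [evens, js, List.filter_append]
  split_ifs with h <;> simp [h]

theorem odds_concat (l : List Char) (c : Char) :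
    odds (l ++ [c]) = odds l ++ (if idxN c % 2 == 0 then [] else [idxN c]) := by
  simp [odds, js, List.filter_append]
  split_ifs <;> simp_all

theorem bfold (l : List Char) :
    l.foldl stepB (0, 0, 0, 0, false, false) =
      ((((evens l).min?.getD 0 : Nat) : Int), (((evens l).max?.getD 0 : Nat) : Int),
       (((odds l).min?.getD 0 : Nat) : Int), (((odds l).max?.getD 0 : Nat) : Int),
       !(evens l).isEmpty, !(odds l).isEmpty) := by
  induction l using List.reverseRecOn with
  | nil => simp [evens, odds, js]
  | append_singleton l c ih =>
    rw [List.foldl_append, ih, List.foldl_cons, List.foldl_nil]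
    unfold stepB
    rw [idx_int c, evens_concat, odds_concat]
    simp only [jmod2, beq_iff_eq, Nat.cast_eq_zero]
    by_cases hpar : idxN c % 2 = 0
    · simp only [if_pos hpar, List.append_nil]
      rw [min?_concat, max?_concat]
      by_cases hE : evens l = []
      · simp [hE]
      · have hne : (evens l).isEmpty = false := by simpa [List.isEmpty_iff] using hE
        obtain ⟨m, hm⟩ : ∃ m, (evens l).min? = some m := by
          cases h : (evens l).min? with
          | none => exact absurd (List.min?_eq_none_iff.mp h) hE
          | some m => exact ⟨m, rfl⟩
        obtain ⟨M, hM⟩ : ∃ M, (evens l).max? = some M := by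
          cases h : (evens l).max? with
          | none => exact absurd (List.max?_eq_none_iff.mp h) hE
          | some M => exact ⟨M, rfl⟩
        simp only [hne, hm, hM, Bool.not_false, if_true, Option.getD_some, Prod.mk.injEq]
        and_intros <;> first | trivial | (split_ifs <;> omega) | simp
    · simp only [if_neg hpar, List.append_nil]
      rw [min?_concat, max?_concat]
      by_cases hO : odds l = []
      · simp [hO]
      · have hne : (odds l).isEmpty = false := by simpa [List.isEmpty_iff] using hO
        obtain ⟨m, hm⟩ : ∃ m, (odds l).min? = some m := by
          cases h : (odds l).min? with
          | none => exact absurd (List.min?_eq_none_iff.mp h) hO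
          | some m => exact ⟨m, rfl⟩
        obtain ⟨M, hM⟩ : ∃ M, (odds l).max? = some M := by
          cases h : (odds l).max? with
          | none => exact absurd (List.max?_eq_none_iff.mp h) hO
          | some M => exact ⟨M, rfl⟩
        simp only [hne, hm, hM, Bool.not_false, if_true, Option.getD_some, Prod.mk.injEq]
        and_intros <;> first | trivial | (split_ifs <;> omega) | simp

-- ===== VERDICT (by name: the statement is the Claim_ definition above) =====
theorem solve_spec : Claim_equal_solve := by
  intro A _hd hp
  simp only [Pre_solve, List.all_eq_true, Bool.and_eq_true, decide_eq_true_iff] at hp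
  unfold Spec_solve
  simp only [solve, solve_alt]
  rw [bfold A.toList]
  set F : List Int := A.toList.foldl (fun f ch => pyIncrAt f ((ch.toNat : Int) - 97))
      (List.replicate 26 (0 : Int)) with hF
  obtain ⟨hlen, hcnt⟩ := freq_spec A.toList (List.replicate 26 (0 : Int)) (by simp) hp
  have hbe : ∀ j ∈ evens A.toList, j < 26 := by
    intro j hj
    obtain ⟨hj1, _⟩ := List.mem_filter.mp hj
    obtain ⟨c, _, rfl⟩ := List.mem_map.mp hj1
    exact idxN_lt c
  have hbo : ∀ j ∈ odds A.toList, j < 26 := by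
    intro j hj
    obtain ⟨hj1, _⟩ := List.mem_filter.mp hj
    obtain ⟨c, _, rfl⟩ := List.mem_map.mp hj1
    exact idxN_lt c
  have hval : ∀ k : Nat, k < 26 → PySem.List.pyGetD F (k : Int) 0 = ((js A.toList).count k : Int) := by
    intro k hk
    have hrep : (List.replicate 26 (0 : Int)).getD k 0 = 0 := by
      rw [List.getD_eq_getElem?_getD, List.getElem?_replicate]
      simp [hk]
    rw [PySem.List.pyGetD_natCast, hcnt k hk, hrep, zero_add]
  have hqe : ∀ k : Nat, k < 26 →
      ((PySem.Int.mod (k : Int) 2 == 0 && decide (0 < PySem.List.pyGetD F (k : Int) 0)) = true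
        ↔ k ∈ evens A.toList) := by
    intro k hk
    rw [hval k hk]
    simp only [jmod2, Bool.and_eq_true, beq_iff_eq, Nat.cast_eq_zero, decide_eq_true_iff]
    constructor
    · rintro ⟨h1, h2⟩
      have hc : 0 < (js A.toList).count k := by omega
      exact List.mem_filter.mpr ⟨List.count_pos_iff.mp hc, by simpa using h1⟩
    · intro h
      obtain ⟨h1, h2⟩ := List.mem_filter.mp h
      have hc := List.count_pos_iff.mpr h1
      exact ⟨by simpa using h2, by omega⟩
  have hqo : ∀ k : Nat, k < 26 →
      ((PySem.Int.mod (k : Int) 2 != 0 && decide (0 < PySem.List.pyGetD F (k : Int) 0)) = true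
        ↔ k ∈ odds A.toList) := by
    intro k hk
    rw [hval k hk]
    simp only [jmod2, Bool.and_eq_true, bne_iff_ne, ne_eq, Nat.cast_eq_zero, decide_eq_true_iff]
    constructor
    · rintro ⟨h1, h2⟩
      have hc : 0 < (js A.toList).count k := by omega
      exact List.mem_filter.mpr ⟨List.count_pos_iff.mp hc, by simpa using h1⟩
    · intro h
      obtain ⟨h1, h2⟩ := List.mem_filter.mp h
      have hc := List.count_pos_iff.mpr h1
      refine ⟨by simpa using h2, by omega⟩
  rw [find?_asc _ _ hqe hbe, find?_asc _ _ hqo hbo, find?_desc _ _ hqo hbo, find?_desc _ _ hqe hbe]
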